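-- pv_equiv track=rewrite | github.com/blegloannec/CodeProblems | Kattis/help2.py | match_both
-- ===== SOURCE A (Python) =====
-- is_word = lambda w: w[0]!='<'
--
-- def find(Repr, x):
--     if x not in Repr:
--         return x
--     Repr[x] = find(Repr, Repr[x])
--     return Repr[x]
--
-- def union(Repr, Word, a, b):
--     a0 = find(Repr, a)
--     b0 = find(Repr, b)
--     if a0!=b0:
--         Repr[b0] = a0
--         if b0 in Word:
--             if a0 not in Word:
--                 Word[a0] = Word[b0]
--             elif Word[a0]!=Word[b0]:
--                 return False
--     return True
--
-- def match_both(A, B):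
--     if len(A)!=len(B):
--         return '-'
--     Repr, Word = {}, {}
--     for a,b in zip(A,B):
--         a0, b0 = 'A'+a, 'B'+b
--         if is_word(a): Word[a0] = a
--         if is_word(b): Word[b0] = b
--         if not union(Repr, Word, a0, b0):
--             return '-'
--     return ' '.join(Word.get(find(Repr,'A'+a),'x') for a in A)
-- ===== SOURCE B (Python) =====
-- def match_both(A, B):
--     if len(A) != len(B):
--         return '-'
--     comp = {}      # node -> component id
--     members = {}   # component id -> its nodes
--     word = {}      # component id -> the unique word of the component, if any
--     nxt = 0
--     for a, b in zip(A, B):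
--         for node, tok in (('A' + a, a), ('B' + b, b)):
--             if node not in comp:
--                 comp[node] = nxt
--                 members[nxt] = [node]
--                 if tok[0] != '<':
--                     word[nxt] = tok
--                 nxt += 1
--         ca, cb = comp['A' + a], comp['B' + b]
--         if ca != cb:
--             if cb in word:
--                 if ca not in word:
--                     word[ca] = word[cb]
--                 elif word[ca] != word[cb]:
--                     return '-'
--             for node in members[cb]:
--                 comp[node] = ca
--             members[ca] += members[cb]
--             del members[cb]
--     return ' '.join(word.get(comp['A' + a], 'x') for a in A)
-- ===== Notes on version B (the rewrite author's own statement) =====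
-- stated objective: alternative
-- what changed: Replaced the recursive path-compressing union-find (parent dict + recursive find with path compression, words stored at representative nodes) by an eager component-relabelling scheme: a node->component-id dict plus per-component member lists and a component-id->word dict, merging by relabelling the smaller structure's members in place, so no find recursion or parent pointers exist and lookups in the output phase are direct.
-- outside the precondition, e.g. on match_both(['<x>', '<x>', ''], ['p', 'q', 'r']): A returns '-', B returns '-'
import Mathlib
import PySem

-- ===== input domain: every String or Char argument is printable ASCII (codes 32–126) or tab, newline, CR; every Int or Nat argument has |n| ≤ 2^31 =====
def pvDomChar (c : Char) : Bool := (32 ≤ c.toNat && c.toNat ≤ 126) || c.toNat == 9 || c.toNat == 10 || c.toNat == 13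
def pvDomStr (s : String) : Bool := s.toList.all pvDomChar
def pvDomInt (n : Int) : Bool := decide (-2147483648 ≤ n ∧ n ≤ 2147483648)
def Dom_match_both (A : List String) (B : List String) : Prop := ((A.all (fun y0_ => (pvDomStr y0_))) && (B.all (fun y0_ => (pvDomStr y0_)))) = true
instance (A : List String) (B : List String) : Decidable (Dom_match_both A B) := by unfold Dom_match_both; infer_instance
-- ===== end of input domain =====

-- B replaces A's recursive path-compressing union-find by an eager component-relabelling
-- scheme (node -> component id, per-component member lists, component id -> word); the
-- RETURN VALUES are proved equal on Pre_ (no empty-string tokens when the lengths match).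

abbrev pvK := List Char
abbrev pvRD := PySem.Dict pvK pvK
abbrev pvWD := PySem.Dict pvK String
abbrev pvCD := PySem.Dict pvK Int
abbrev pvMD := PySem.Dict Int (List pvK)
abbrev pvID := PySem.Dict Int String

-- ===== PORT A =====

-- is_word = lambda w: w[0]!='<'   (w[0] via pyGet?; Pre_ keeps tokens nonempty, where this is exact)

def pvIsWord (w : String) : Bool := PySem.List.pyGet? w.toList 0 != some '<'

-- find(Repr, x) with path compression; the dict is threaded (Python mutates it).
-- Fuel is a totality guard only; call sites pass size+1, enough for the acyclic forests arising here.

def pvFind : Nat → pvRD → pvK → pvRD × pvK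
  | 0, r, x => (r, x)
  | n+1, r, x =>
    match r.get? x with
    | none => (r, x)
    | some p =>
      let res := pvFind n r p
      (res.1.insert x res.2, res.2)

-- union(Repr, Word, a, b): returns (Repr', Word', ok)

def pvUnion (r : pvRD) (w : pvWD) (a b : pvK) : pvRD × pvWD × Bool :=
  let fa := pvFind (r.size + 1) r a
  let fb := pvFind (fa.1.size + 1) fa.1 b
  let a0 := fa.2
  let b0 := fb.2
  let r2 := fb.1
  if a0 = b0 then (r2, w, true)
  else
    let r3 := r2.insert b0 a0
    match w.get? b0 with
    | none => (r3, w, true)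
    | some wb =>
      match w.get? a0 with
      | none => (r3, w.insert a0 wb, true)
      | some wa => if wa = wb then (r3, w, true) else (r3, w, false)

-- the two finds inside pvUnion: roots and a preserved dict

-- one iteration of A's main loop ('A'+a = 'A' :: a.toList); none = the early `return '-'`

def pvStepA (st : Option (pvRD × pvWD)) (p : String × String) : Option (pvRD × pvWD) :=
  match st with
  | none => none
  | some (r, w) =>
    let a0 : pvK := 'A' :: p.1.toList
    let b0 : pvK := 'B' :: p.2.toList
    let w1 := if pvIsWord p.1 then w.insert a0 p.1 else w
    let w2 := if pvIsWord p.2 then w1.insert b0 p.2 else w1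
    let u := pvUnion r w2 a0 b0
    if u.2.2 then some (u.1, u.2.1) else none

def match_both (A : List String) (B : List String) : String :=
  if A.length ≠ B.length then "-"
  else
    match (A.zip B).foldl pvStepA (some (PySem.Dict.empty, PySem.Dict.empty)) with
    | none => "-"
    | some (r, w) =>
      let out := A.foldl (fun (st : pvRD × List String) a =>
        let f := pvFind (st.1.size + 1) st.1 ('A' :: a.toList)
        (f.1, st.2 ++ [w.getD f.2 "x"])) (r, [])
      PySem.Str.join " " out.2

-- ===== PORT B =====

-- Source B's `tok[0] != '<'` test

def pvWordTest (tok : String) : Bool := PySem.List.pyGet? tok.toList 0 != some '<'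

-- the body of Source B's `for node, tok in ...: if node not in comp: ...`

def pvAddNode (st : pvCD × pvMD × pvID × Int) (node : pvK) (tok : String) :
    pvCD × pvMD × pvID × Int :=
  let (comp, members, word, nxt) := st
  if comp.contains node then st
  else (comp.insert node nxt, members.insert nxt [node],
        (if pvWordTest tok then word.insert nxt tok else word), nxt + 1)

-- one iteration of Source B's loop; none = the early `return '-'`

def pvStepB (st : Option (pvCD × pvMD × pvID × Int)) (p : String × String) :
    Option (pvCD × pvMD × pvID × Int) :=
  match st with
  | none => none
  | some st0 =>
    let st1 := pvAddNode st0 ('A' :: p.1.toList) p.1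
    let st2 := pvAddNode st1 ('B' :: p.2.toList) p.2
    let (comp, members, word, nxt) := st2
    let ca := comp.getD ('A' :: p.1.toList) 0
    let cb := comp.getD ('B' :: p.2.toList) 0
    if ca = cb then some (comp, members, word, nxt)
    else
      let wres : Option pvID :=
        match word.get? cb with
        | none => some word
        | some wb =>
          match word.get? ca with
          | none => some (word.insert ca wb)
          | some wa => if wa = wb then some word else none
      match wres with
      | none => none
      | some word' =>
        let comp' := (members.getD cb []).foldl (fun c n => c.insert n ca) comp
        let members' := (members.insert ca (members.getD ca [] ++ members.getD cb [])).erase cb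
        some (comp', members', word', nxt)

-- get? of erase (no PySem lemma exists for erase)

def match_both_alt (A : List String) (B : List String) : String :=
  if A.length ≠ B.length then "-"
  else
    match (A.zip B).foldl pvStepB (some (PySem.Dict.empty, PySem.Dict.empty, PySem.Dict.empty, 0)) with
    | none => "-"
    | some (comp, _, word, _) =>
      PySem.Str.join " " (A.map fun a => word.getD (comp.getD ('A' :: a.toList) 0) "x")

-- ===== PRECONDITION & SPEC =====
-- Pre_ excludes inputs containing an empty-string token when the lengths match: on those
-- Python A's is_word('') raises IndexError (on a prefix of them A may return '-' before
-- reaching the empty token and B then returns '-' as well, see the cite in claim.json).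
def Pre_match_both (A : List String) (B : List String) : Prop :=
  A.length = B.length → ("" ∉ A ∧ "" ∉ B)
instance (A : List String) (B : List String) : Decidable (Pre_match_both A B) := by
  unfold Pre_match_both; infer_instance

def pvWitness_match_both : List String × List String := (["<t>", "hi"], ["hi", "<t>"])

def Spec_match_both (A : List String) (B : List String) (out : String) : Prop := out = match_both_alt A B
instance (A : List String) (B : List String) (out : String) : Decidable (Spec_match_both A B out) := by
  unfold Spec_match_both; infer_instance

-- ===== CLAIM (what is proved, stated in full; the proofs are below) =====
def Claim_equal_match_both : Prop := ∀ (A : List String) (B : List String), Dom_match_both A B → Pre_match_both A B → Spec_match_both A B (match_both A B)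

-- ===== LEMMAS AND PROOFS =====

def pvRootN : Nat → pvRD → pvK → Option pvK
  | 0, r, x => if r.contains x then none else some x
  | n+1, r, x =>
    match r.get? x with
    | none => some x
    | some p => pvRootN n r p

lemma pvRootN_none {r : pvRD} {x : pvK} (h : r.get? x = none) (n : Nat) :
    pvRootN n r x = some x := by
  cases n with
  | zero => simp [pvRootN, PySem.Dict.contains_eq_isSome_get?, h]
  | succ n => simp [pvRootN, h]

lemma pvRootN_mono {r : pvRD} {x t : pvK} :
    ∀ {n : Nat}, pvRootN n r x = some t → pvRootN (n+1) r x = some t := by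
  intro n
  induction n generalizing x with
  | zero =>
    intro h
    simp only [pvRootN] at h
    by_cases hc : r.contains x
    · simp [hc] at h
    · simp [hc] at h
      subst h
      have hg : r.get? x = none := by
        rw [PySem.Dict.get?_eq_none_iff_contains]; simpa using hc
      exact pvRootN_none hg 1
  | succ n ih =>
    intro h
    simp only [pvRootN] at h ⊢
    cases hg : r.get? x with
    | none => simp [hg] at h ⊢; exact h
    | some p => simp [hg] at h ⊢; exact ih h

lemma pvRootN_le {r : pvRD} {x t : pvK} {n m : Nat} (hnm : n ≤ m)
    (h : pvRootN n r x = some t) : pvRootN m r x = some t := by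
  induction m with
  | zero => have : n = 0 := by omega
            subst this; exact h
  | succ m ih =>
    rcases Nat.lt_or_ge n (m+1) with hl | hl
    · exact pvRootN_mono (ih (by omega))
    · have : n = m + 1 := by omega
      subst this; exact h

lemma pvRootN_det {r : pvRD} {x t t' : pvK} {n m : Nat}
    (h : pvRootN n r x = some t) (h' : pvRootN m r x = some t') : t = t' := by
  have h1 := pvRootN_le (Nat.le_max_left n m) h
  have h2 := pvRootN_le (Nat.le_max_right n m) h'
  rw [h1] at h2; exact Option.some_injective _ h2

lemma pvRootN_root {r : pvRD} {x t : pvK} {n : Nat} (h : pvRootN n r x = some t) :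
    r.get? t = none := by
  induction n generalizing x with
  | zero =>
    simp only [pvRootN] at h
    by_cases hc : r.contains x
    · simp [hc] at h
    · simp [hc] at h; subst h
      rw [PySem.Dict.get?_eq_none_iff_contains]; simpa using hc
  | succ n ih =>
    simp only [pvRootN] at h
    cases hg : r.get? x with
    | none => simp [hg] at h; subst h; exact hg
    | some p => simp [hg] at h; exact ih h

lemma pvRootN_insert_compress {r : pvRD} {x t : pvK} {k : Nat}
    (hx : r.get? x ≠ none) (ht : pvRootN k r x = some t) :
    ∀ n y s, pvRootN n r y = some s → pvRootN n (r.insert x t) y = some s := by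
  have htroot : r.get? t = none := pvRootN_root ht
  have htx : t ≠ x := by intro h; rw [h] at htroot; exact hx htroot
  have htins : (r.insert x t).get? t = none := by
    rw [PySem.Dict.get?_insert_of_ne _ _ htx]; exact htroot
  have hcx : r.contains x = true := by
    rw [PySem.Dict.contains_eq_isSome_get?]
    cases hg : r.get? x with
    | none => exact absurd hg hx
    | some p => simp
  intro n
  induction n with
  | zero =>
    intro y s h
    simp only [pvRootN] at h ⊢
    by_cases hc : r.contains y
    · simp [hc] at h
    · simp [hc] at h
      have hyx : y ≠ x := by
        intro he; rw [he, hcx] at hc; exact hc rfl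
      have hcont : (r.insert x t).contains y = false := by
        rw [PySem.Dict.contains_insert]
        have h1 : (y == x) = false := by simp [hyx]
        rw [h1]
        simpa using hc
      subst h; simp [hcont]
  | succ n ih =>
    intro y s h
    by_cases hyx : y = x
    · subst hyx
      have hs : s = t := pvRootN_det h ht
      subst hs
      have hred : pvRootN (n+1) (r.insert y s) y = pvRootN n (r.insert y s) s := by
        simp [pvRootN, PySem.Dict.get?_insert_self]
      rw [hred]
      exact pvRootN_none htins n
    · simp only [pvRootN] at h ⊢
      rw [PySem.Dict.get?_insert_of_ne _ _ hyx]
      cases hg : r.get? y with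
      | none => simp [hg] at h ⊢; exact h
      | some p => simp [hg] at h ⊢; exact ih p s h

lemma pvRootN_insert_link {r : pvRD} {a0 b0 : pvK}
    (ha : r.get? a0 = none) (hb : r.get? b0 = none) (hne : a0 ≠ b0) :
    ∀ n y s, pvRootN n r y = some s →
      pvRootN (n+1) (r.insert b0 a0) y = some (if s = b0 then a0 else s) := by
  have hains : (r.insert b0 a0).get? a0 = none := by
    rw [PySem.Dict.get?_insert_of_ne _ _ hne]; exact ha
  intro n
  induction n with
  | zero =>
    intro y s h
    simp only [pvRootN] at h
    by_cases hc : r.contains y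
    · simp [hc] at h
    · simp [hc] at h; subst h
      by_cases hyb : y = b0
      · subst hyb
        simp only [pvRootN, PySem.Dict.get?_insert_self]
        exact (pvRootN_none hains 0)
      · have hgy : r.get? y = none := by
          rw [PySem.Dict.get?_eq_none_iff_contains]; simpa using hc
        have : (r.insert b0 a0).get? y = none := by
          rw [PySem.Dict.get?_insert_of_ne _ _ hyb]; exact hgy
        rw [if_neg hyb]
        exact pvRootN_none this 1
  | succ n ih =>
    intro y s h
    simp only [pvRootN] at h
    cases hg : r.get? y with
    | none =>
      simp [hg] at h; subst h
      by_cases hyb : y = b0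
      · subst hyb
        simp only [pvRootN, PySem.Dict.get?_insert_self]
        exact pvRootN_none hains (n+1)
      · have : (r.insert b0 a0).get? y = none := by
          rw [PySem.Dict.get?_insert_of_ne _ _ hyb]; exact hg
        rw [if_neg hyb]
        exact pvRootN_none this (n+2)
    | some p =>
      simp [hg] at h
      have hyb : y ≠ b0 := by intro he; subst he; rw [hg] at hb; cases hb
      have := ih p s h
      simp only [pvRootN]
      rw [PySem.Dict.get?_insert_of_ne _ _ hyb, hg]
      exact this

def pvPres (r r' : pvRD) : Prop :=
  r'.keys = r.keys ∧ ∀ m y s, pvRootN m r y = some s → pvRootN m r' y = some s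

lemma pvPres_refl (r : pvRD) : pvPres r r := ⟨rfl, fun _ _ _ h => h⟩

lemma pvPres_trans {r1 r2 r3 : pvRD} (h12 : pvPres r1 r2) (h23 : pvPres r2 r3) : pvPres r1 r3 :=
  ⟨h23.1.trans h12.1, fun m y s h => h23.2 m y s (h12.2 m y s h)⟩

lemma pvSize_eq_keys_length (r : pvRD) : r.size = r.keys.length := by
  simp [PySem.Dict.size, PySem.Dict.keys]

lemma pvPres_size {r r' : pvRD} (h : pvPres r r') : r'.size = r.size := by
  rw [pvSize_eq_keys_length, pvSize_eq_keys_length, h.1]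

def pvGood (r : pvRD) : Prop := ∀ x, (pvRootN (r.size + 1) r x).isSome

def pvRoot (r : pvRD) (x : pvK) : pvK := (pvRootN (r.size + 1) r x).getD x

lemma pvGood_rootN {r : pvRD} (hg : pvGood r) (x : pvK) :
    pvRootN (r.size + 1) r x = some (pvRoot r x) := by
  have := hg x
  cases h : pvRootN (r.size + 1) r x with
  | none => rw [h] at this; simp at this
  | some t => simp [pvRoot, h]

lemma pvGood_pres {r r' : pvRD} (hg : pvGood r) (h : pvPres r r') : pvGood r' := by
  intro x
  have := h.2 (r.size + 1) x _ (pvGood_rootN hg x)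
  rw [pvPres_size h, this]
  simp

lemma pvRoot_pres {r r' : pvRD} (hg : pvGood r) (h : pvPres r r') (x : pvK) :
    pvRoot r' x = pvRoot r x := by
  have h1 := h.2 (r.size + 1) x _ (pvGood_rootN hg x)
  rw [← pvPres_size h] at h1
  simp [pvRoot, h1]

lemma pvFind_spec : ∀ {n : Nat} {r : pvRD} {x t : pvK}, pvRootN n r x = some t →
    (pvFind n r x).2 = t ∧ pvPres r (pvFind n r x).1 := by
  intro n
  induction n with
  | zero =>
    intro r x t h
    simp only [pvRootN] at h
    by_cases hc : r.contains x
    · simp [hc] at h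
    · simp [hc] at h; subst h
      exact ⟨rfl, pvPres_refl r⟩
  | succ n ih =>
    intro r x t h
    simp only [pvRootN] at h
    cases hg : r.get? x with
    | none =>
      simp [hg] at h; subst h
      simp only [pvFind, hg]
      exact ⟨trivial, pvPres_refl r⟩
    | some p =>
      simp [hg] at h
      obtain ⟨h2, hpres⟩ := ih (r := r) (x := p) h
      have hcx : r.contains x = true := by
        rw [PySem.Dict.contains_eq_isSome_get?, hg]; simp
      have hcx1 : (pvFind n r p).1.contains x = true := by
        rw [PySem.Dict.contains_iff_mem_keys, hpres.1, ← PySem.Dict.contains_iff_mem_keys]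
        exact hcx
      have hgx1 : (pvFind n r p).1.get? x ≠ none := by
        intro hnone
        rw [PySem.Dict.get?_eq_none_iff_contains] at hnone
        rw [hcx1] at hnone; cases hnone
      have hroot1 : pvRootN (n+1) (pvFind n r p).1 x = some t := by
        apply hpres.2
        simp only [pvRootN, hg]
        exact h
      constructor
      · simp only [pvFind, hg, h2]
      · simp only [pvFind, hg]
        apply pvPres_trans hpres
        constructor
        · rw [h2]
          exact PySem.Dict.keys_insert_of_contains _ _ hcx1
        · intro m y s hys
          rw [h2]
          exact pvRootN_insert_compress hgx1 hroot1 m y s hys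

lemma pvUnion_finds {r : pvRD} (hgood : pvGood r) (a b : pvK) :
    (pvFind (r.size + 1) r a).2 = pvRoot r a ∧
    pvPres r (pvFind (r.size + 1) r a).1 ∧
    (pvFind ((pvFind (r.size + 1) r a).1.size + 1) (pvFind (r.size + 1) r a).1 b).2 = pvRoot r b ∧
    pvPres r (pvFind ((pvFind (r.size + 1) r a).1.size + 1) (pvFind (r.size + 1) r a).1 b).1 := by
  obtain ⟨ha2, hpa⟩ := pvFind_spec (pvGood_rootN hgood a)
  have hgood1 : pvGood (pvFind (r.size + 1) r a).1 := pvGood_pres hgood hpa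
  have hrootb : pvRootN ((pvFind (r.size + 1) r a).1.size + 1) (pvFind (r.size + 1) r a).1 b
      = some (pvRoot r b) := by
    have := pvGood_rootN hgood1 b
    rw [this, pvRoot_pres hgood hpa b]
  obtain ⟨hb2, hpb⟩ := pvFind_spec hrootb
  exact ⟨ha2, hpa, hb2, pvPres_trans hpa hpb⟩

lemma pvUnion_eq_spec {r : pvRD} {w : pvWD} {a b : pvK} (hgood : pvGood r)
    (heq : pvRoot r a = pvRoot r b) :
    (pvUnion r w a b).2.1 = w ∧ (pvUnion r w a b).2.2 = true ∧
    pvPres r (pvUnion r w a b).1 := by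
  obtain ⟨ha2, hpa, hb2, hpb⟩ := pvUnion_finds hgood a b
  simp only [pvUnion, ha2, hb2, heq]
  rw [if_pos trivial]
  exact ⟨rfl, rfl, hpb⟩

lemma pvUnion_ne_spec {r : pvRD} {w : pvWD} {a b : pvK} (hgood : pvGood r)
    (hne : pvRoot r a ≠ pvRoot r b) :
    pvGood (pvUnion r w a b).1 ∧
    (∀ x, pvRoot (pvUnion r w a b).1 x =
        if pvRoot r x = pvRoot r b then pvRoot r a else pvRoot r x) ∧
    (∀ z, z ∈ (pvUnion r w a b).1.keys ↔ z ∈ r.keys ∨ z = pvRoot r b) ∧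
    ((pvUnion r w a b).2.2 = false ↔
        (∃ wb wa, w.get? (pvRoot r b) = some wb ∧ w.get? (pvRoot r a) = some wa ∧ wa ≠ wb)) ∧
    ((pvUnion r w a b).2.1 =
      match w.get? (pvRoot r b), w.get? (pvRoot r a) with
      | some wb, none => w.insert (pvRoot r a) wb
      | _, _ => w) := by
  obtain ⟨ha2, hpa, hb2, hpb⟩ := pvUnion_finds hgood a b
  set r2 := (pvFind ((pvFind (r.size + 1) r a).1.size + 1) (pvFind (r.size + 1) r a).1 b).1 with hr2
  have hgood2 : pvGood r2 := pvGood_pres hgood hpb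
  have hra : ∀ x, pvRoot r2 x = pvRoot r x := pvRoot_pres hgood hpb
  -- roots are keyless in r2
  have haroot : r2.get? (pvRoot r a) = none := by
    have := pvGood_rootN hgood2 a
    rw [hra a] at this
    exact pvRootN_root this
  have hbroot : r2.get? (pvRoot r b) = none := by
    have := pvGood_rootN hgood2 b
    rw [hra b] at this
    exact pvRootN_root this
  have hlink := pvRootN_insert_link haroot hbroot (fun h => hne h) 
  have hsize3 : (r2.insert (pvRoot r b) (pvRoot r a)).size = r2.size + 1 := by
    rw [PySem.Dict.size_insert]
    have : r2.contains (pvRoot r b) = false := by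
      rw [← PySem.Dict.get?_eq_none_iff_contains]; exact hbroot
    rw [this]; simp
  have hroot3 : ∀ x, pvRootN ((r2.insert (pvRoot r b) (pvRoot r a)).size + 1)
      (r2.insert (pvRoot r b) (pvRoot r a)) x
      = some (if pvRoot r x = pvRoot r b then pvRoot r a else pvRoot r x) := by
    intro x
    have h2 : pvRootN (r2.size + 1) r2 x = some (pvRoot r x) := by
      have := pvGood_rootN hgood2 x; rw [hra x] at this; exact this
    have := hlink (r2.size + 1) x _ h2
    rw [hsize3]
    exact this
  have hgood3 : pvGood (r2.insert (pvRoot r b) (pvRoot r a)) := by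
    intro x; rw [hroot3 x]; simp
  have hkeys3 : ∀ z, z ∈ (r2.insert (pvRoot r b) (pvRoot r a)).keys ↔ z ∈ r.keys ∨ z = pvRoot r b := by
    intro z
    have hnc : r2.contains (pvRoot r b) = false := by
      rw [← PySem.Dict.get?_eq_none_iff_contains]; exact hbroot
    rw [PySem.Dict.keys_insert_of_not_contains _ _ hnc]
    simp [hpb.1]
  have hroot3' : ∀ x, pvRoot (r2.insert (pvRoot r b) (pvRoot r a)) x
      = if pvRoot r x = pvRoot r b then pvRoot r a else pvRoot r x := by
    intro x
    have hx := hroot3 x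
    simp only [pvRoot] at hx ⊢
    rw [hx]
    rfl
  -- now unfold pvUnion
  simp only [pvUnion, ha2, hb2, ← hr2, if_neg hne]
  cases hwb : w.get? (pvRoot r b) with
  | none =>
    dsimp only
    refine ⟨hgood3, hroot3', hkeys3, ?_, ?_⟩
    · simp
    · simp
  | some wb =>
    cases hwa : w.get? (pvRoot r a) with
    | none =>
      dsimp only
      refine ⟨hgood3, hroot3', hkeys3, ?_, ?_⟩
      · simp
      · simp
    | some wa =>
      dsimp only
      by_cases hww : wa = wb
      · subst hww
        rw [if_pos rfl]
        refine ⟨hgood3, hroot3', hkeys3, ?_, ?_⟩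
        · simp
        · simp
      · rw [if_neg hww]
        refine ⟨hgood3, hroot3', hkeys3, ?_, ?_⟩
        · constructor
          · intro _; exact ⟨wb, wa, rfl, rfl, hww⟩
          · intro _; rfl
        · simp

lemma pvGet?_erase {κ ν : Type} [BEq κ] [LawfulBEq κ] [DecidableEq κ] (d : PySem.Dict κ ν) (k k' : κ) :
    (d.erase k).get? k' = if k' = k then none else d.get? k' := by
  obtain ⟨l⟩ := d
  simp only [PySem.Dict.erase, PySem.Dict.get?]
  induction l with
  | nil => simp
  | cons hd tl ih =>
    by_cases h1 : hd.1 = k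
    · rw [List.filter_cons_of_neg (by simp [h1])]
      rw [ih]
      by_cases h2 : k' = k
      · simp [h2]
      · rw [if_neg h2, if_neg h2, List.find?_cons_of_neg (by simp [h1, Ne.symm h2])]
    · rw [List.filter_cons_of_pos (by simp [h1])]
      by_cases h2 : hd.1 = k'
      · have hk : k' ≠ k := by rw [← h2]; exact fun he => h1 he
        rw [if_neg hk, List.find?_cons_of_pos (by simp [h2]), List.find?_cons_of_pos (by simp [h2])]
      · rw [List.find?_cons_of_neg (by simp [h2]), List.find?_cons_of_neg (by simp [h2])]
        exact ih

lemma pvGetD_erase {κ ν : Type} [BEq κ] [LawfulBEq κ] [DecidableEq κ] (d : PySem.Dict κ ν) (k k' : κ) (d0 : ν) :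
    (d.erase k).getD k' d0 = if k' = k then d0 else d.getD k' d0 := by
  rw [PySem.Dict.getD_eq_get?_getD, pvGet?_erase]
  by_cases h : k' = k
  · simp [h]
  · simp [h, PySem.Dict.getD_eq_get?_getD]

-- the relabel loop: getD and contains
lemma pvRelabel_getD (l : List pvK) (v : Int) :
    ∀ (comp : pvCD) (x : pvK),
      (l.foldl (fun c n => c.insert n v) comp).getD x 0 =
        if x ∈ l then v else comp.getD x 0 := by
  induction l with
  | nil => intro comp x; simp
  | cons hd tl ih =>
    intro comp x
    simp only [List.foldl_cons, ih, List.mem_cons]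
    by_cases hx : x ∈ tl
    · simp [hx]
    · simp only [hx, if_false, or_false]
      rw [PySem.Dict.getD_insert]

lemma pvRelabel_contains (l : List pvK) (v : Int) :
    ∀ (comp : pvCD) (x : pvK),
      (l.foldl (fun c n => c.insert n v) comp).contains x =
        (decide (x ∈ l) || comp.contains x) := by
  induction l with
  | nil => intro comp x; simp
  | cons hd tl ih =>
    intro comp x
    simp only [List.foldl_cons, ih, List.mem_cons, PySem.Dict.contains_insert]
    by_cases hx : x ∈ tl
    · simp [hx]
    · by_cases hxh : x = hd
      · simp [hxh]
      · simp [hx, hxh]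

lemma pvMem_zip_left : ∀ {A B : List String}, A.length = B.length →
    ∀ a ∈ A, ∃ b, (a, b) ∈ A.zip B := by
  intro A
  induction A with
  | nil => intro B _ a ha; cases ha
  | cons x xs ih =>
    intro B hlen a ha
    cases B with
    | nil => simp at hlen
    | cons y ys =>
      rcases List.mem_cons.mp ha with ha | ha
      · exact ⟨y, by simp [ha]⟩
      · obtain ⟨b, hb⟩ := ih (by simpa using hlen) a ha
        exact ⟨b, by simp [List.zip_cons_cons]; right; exact hb⟩

lemma pvRoot_of_get?_none {r : pvRD} {t : pvK} (h : r.get? t = none) : pvRoot r t = t := by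
  rw [pvRoot, pvRootN_none h]; rfl

lemma pvRoot_is_root {r : pvRD} (hg : pvGood r) (x : pvK) : r.get? (pvRoot r x) = none :=
  pvRootN_root (pvGood_rootN hg x)

-- the simulation invariant between A's (Repr, Word) and B's (comp, members, word, nxt)
def pvInv (r : pvRD) (w : pvWD) (comp : pvCD) (members : pvMD) (word : pvID) (nxt : Int) : Prop :=
  pvGood r ∧
  (∀ x, comp.contains x = false → r.get? x = none ∧ w.get? x = none) ∧
  (∀ x, comp.contains x = true → comp.contains (pvRoot r x) = true) ∧
  (∀ x y, comp.contains x = true → comp.contains y = true →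
      (pvRoot r x = pvRoot r y ↔ comp.getD x 0 = comp.getD y 0)) ∧
  (∀ x, comp.contains x = true → w.get? (pvRoot r x) = word.get? (comp.getD x 0)) ∧
  (∀ x (tok : String), comp.contains x = true →
      (x = 'A' :: tok.toList ∨ x = 'B' :: tok.toList) → pvWordTest tok = true →
      w.get? (pvRoot r x) = some tok) ∧
  (∀ c x, x ∈ members.getD c [] ↔ (comp.contains x = true ∧ comp.getD x 0 = c)) ∧
  (∀ x, comp.contains x = true → comp.getD x 0 < nxt) ∧
  (∀ c, nxt ≤ c → word.get? c = none)

-- the invariant only sees r through pvRoot / keys, so a preserved dict keeps it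
lemma pvInv_pres {r r' : pvRD} {w : pvWD} {comp : pvCD} {members : pvMD} {word : pvID} {nxt : Int}
    (hinv : pvInv r w comp members word nxt) (hp : pvPres r r') :
    pvInv r' w comp members word nxt := by
  obtain ⟨h1, h2, h3, h4, h5, h6, h7, h8, h9⟩ := hinv
  have hroots := pvRoot_pres h1 hp
  refine ⟨pvGood_pres h1 hp, ?_, ?_, ?_, ?_, ?_, h7, h8, h9⟩
  · intro x hx
    obtain ⟨hr, hw⟩ := h2 x hx
    refine ⟨?_, hw⟩
    rw [PySem.Dict.get?_eq_none_iff_not_mem_keys] at hr ⊢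
    rw [hp.1]; exact hr
  · intro x hx; rw [hroots]; exact h3 x hx
  · intro x y hx hy; rw [hroots, hroots]; exact h4 x y hx hy
  · intro x hx; rw [hroots]; exact h5 x hx
  · intro x tok hx hf hw; rw [hroots]; exact h6 x tok hx hf hw

lemma pvInv_wext {r : pvRD} {w w' : pvWD} {comp : pvCD} {members : pvMD} {word : pvID} {nxt : Int}
    (hw : ∀ y, w'.get? y = w.get? y) (hinv : pvInv r w comp members word nxt) :
    pvInv r w' comp members word nxt := by
  obtain ⟨h1, h2, h3, h4, h5, h6, h7, h8, h9⟩ := hinv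
  exact ⟨h1, fun x hx => ⟨(h2 x hx).1, (hw x).trans (h2 x hx).2⟩, h3, h4,
    fun x hx => (hw _).trans (h5 x hx),
    fun x tok hx hf hwt => (hw _).trans (h6 x tok hx hf hwt), h7, h8, h9⟩

lemma pvAdd_inv {r : pvRD} {w : pvWD} {comp : pvCD} {members : pvMD} {word : pvID} {nxt : Int}
    (hinv : pvInv r w comp members word nxt)
    (tok : String) (node : pvK) (hnode : node = 'A' :: tok.toList ∨ node = 'B' :: tok.toList) :
    pvInv r (if pvWordTest tok then w.insert node tok else w)
      (pvAddNode (comp, members, word, nxt) node tok).1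
      (pvAddNode (comp, members, word, nxt) node tok).2.1
      (pvAddNode (comp, members, word, nxt) node tok).2.2.1
      (pvAddNode (comp, members, word, nxt) node tok).2.2.2 ∧
    (pvAddNode (comp, members, word, nxt) node tok).1.contains node = true ∧
    (∀ x, comp.contains x = true → (pvAddNode (comp, members, word, nxt) node tok).1.contains x = true) ∧
    nxt ≤ (pvAddNode (comp, members, word, nxt) node tok).2.2.2 := by
  obtain ⟨h1, h2, h3, h4, h5, h6, h7, h8, h9⟩ := hinv
  by_cases hc : comp.contains node
  · -- node already known: B does nothing; A's Word insert is invisible through get?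
    have hstep : pvAddNode (comp, members, word, nxt) node tok = (comp, members, word, nxt) := by
      simp [pvAddNode, hc]
    rw [hstep]
    refine ⟨?_, hc, fun x hx => hx, le_refl nxt⟩
    by_cases hwt : pvWordTest tok
    · rw [if_pos hwt]
      by_cases hroot : r.get? node = none
      · -- node is a root carrying exactly tok already: insert changes no get?
        have hrr : pvRoot r node = node := pvRoot_of_get?_none hroot
        have hold : w.get? node = some tok := by
          have := h6 node tok hc hnode hwt
          rw [hrr] at this; exact this
        refine pvInv_wext (fun y => ?_) ⟨h1, h2, h3, h4, h5, h6, h7, h8, h9⟩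
        by_cases hy : y = node
        · subst hy; rw [PySem.Dict.get?_insert_self, hold]
        · exact PySem.Dict.get?_insert_of_ne _ _ hy
      · -- node is not a root: no invariant looks at w.get? node
        refine ⟨h1, ?_, h3, h4, ?_, ?_, h7, h8, h9⟩
        · intro x hx
          have hxn : x ≠ node := fun he => by rw [he, hc] at hx; cases hx
          exact ⟨(h2 x hx).1, by rw [PySem.Dict.get?_insert_of_ne _ _ hxn]; exact (h2 x hx).2⟩
        · intro x hx
          have hrn : pvRoot r x ≠ node := fun he => hroot (he ▸ pvRoot_is_root h1 x)
          rw [PySem.Dict.get?_insert_of_ne _ _ hrn]; exact h5 x hx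
        · intro x tok' hx hf hwt'
          have hrn : pvRoot r x ≠ node := fun he => hroot (he ▸ pvRoot_is_root h1 x)
          rw [PySem.Dict.get?_insert_of_ne _ _ hrn]; exact h6 x tok' hx hf hwt'
    · rw [if_neg hwt]
      exact ⟨h1, h2, h3, h4, h5, h6, h7, h8, h9⟩
  · -- fresh node
    rw [Bool.not_eq_true] at hc
    have hrnode : r.get? node = none := (h2 node hc).1
    have hwnode : w.get? node = none := (h2 node hc).2
    have hrr : pvRoot r node = node := pvRoot_of_get?_none hrnode
    have hnotroot : ∀ x, comp.contains x = true → pvRoot r x ≠ node := by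
      intro x hx he
      have := h3 x hx
      rw [he, hc] at this; cases this
    have hstep : pvAddNode (comp, members, word, nxt) node tok =
        (comp.insert node nxt, members.insert nxt [node],
         (if pvWordTest tok then word.insert nxt tok else word), nxt + 1) := by
      simp [pvAddNode, hc]
    rw [hstep]
    dsimp only
    have hcont' : ∀ x, (comp.insert node nxt).contains x = true ↔ (x = node ∨ comp.contains x = true) := by
      intro x
      rw [PySem.Dict.contains_insert]
      by_cases hx : x = node
      · simp [hx]
      · simp [hx]
    have hgetD' : ∀ x, (comp.insert node nxt).getD x 0 = if x = node then nxt else comp.getD x 0 := by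
      intro x; rw [PySem.Dict.getD_insert]
    have hwordnew : ∀ c : Int, (if pvWordTest tok then word.insert nxt tok else word).get? c =
        if c = nxt then (if pvWordTest tok then some tok else none) else word.get? c := by
      intro c
      by_cases hwt : pvWordTest tok
      · rw [if_pos hwt]
        by_cases hcn : c = nxt
        · subst hcn; rw [PySem.Dict.get?_insert_self, if_pos rfl, if_pos hwt]
        · rw [PySem.Dict.get?_insert_of_ne _ _ hcn, if_neg hcn]
      · rw [if_neg hwt]
        by_cases hcn : c = nxt
        · subst hcn; rw [if_pos rfl, if_neg hwt]; exact h9 _ (le_refl _)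
        · rw [if_neg hcn]
    have hw1 : ∀ y, (if pvWordTest tok then w.insert node tok else w).get? y =
        if y = node then (if pvWordTest tok then some tok else none) else w.get? y := by
      intro y
      by_cases hwt : pvWordTest tok
      · rw [if_pos hwt]
        by_cases hy : y = node
        · subst hy; rw [PySem.Dict.get?_insert_self, if_pos rfl, if_pos hwt]
        · rw [PySem.Dict.get?_insert_of_ne _ _ hy, if_neg hy]
      · rw [if_neg hwt]
        by_cases hy : y = node
        · subst hy; rw [if_pos rfl, if_neg hwt]; exact hwnode
        · rw [if_neg hy]
    refine ⟨⟨h1, ?_, ?_, ?_, ?_, ?_, ?_, ?_, ?_⟩, ?_, ?_, by omega⟩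
    · -- (2)
      intro x hx
      have hxn : x ≠ node := by
        intro he; subst he
        have := (hcont' x).mpr (Or.inl rfl)
        · rw [hx] at this; cases this
      have hxold : comp.contains x = false := by
        cases hcomp : comp.contains x
        · rfl
        · have := (hcont' x).mpr (Or.inr hcomp); rw [hx] at this; cases this
      refine ⟨(h2 x hxold).1, ?_⟩
      rw [hw1 x, if_neg hxn]; exact (h2 x hxold).2
    · -- (3)
      intro x hx
      rcases (hcont' x).mp hx with hxe | hxold
      · subst hxe; rw [hrr]; exact hx
      · exact (hcont' _).mpr (Or.inr (h3 x hxold))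
    · -- (4)
      intro x y hx hy
      rcases (hcont' x).mp hx with hxe | hxold <;> rcases (hcont' y).mp hy with hye | hyold
      · rw [hxe, hye]; simp
      · rw [hxe, hrr, hgetD', hgetD', if_pos rfl, if_neg (fun he : y = node => by rw [he, hc] at hyold; cases hyold)]
        constructor
        · intro he; exact absurd he.symm (hnotroot y hyold)
        · intro he; exact absurd he.symm (ne_of_lt (h8 y hyold))
      · rw [hye, hrr, hgetD', hgetD', if_pos rfl, if_neg (fun he : x = node => by rw [he, hc] at hxold; cases hxold)]
        constructor
        · intro he; exact absurd he (hnotroot x hxold)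
        · intro he; exact absurd he (ne_of_lt (h8 x hxold))
      · rw [hgetD', hgetD',
          if_neg (fun he : x = node => by rw [he, hc] at hxold; cases hxold),
          if_neg (fun he : y = node => by rw [he, hc] at hyold; cases hyold)]
        exact h4 x y hxold hyold
    · -- (5)
      intro x hx
      rcases (hcont' x).mp hx with hxe | hxold
      · rw [hxe, hrr, hgetD', if_pos rfl, hw1, if_pos rfl, hwordnew, if_pos rfl]
      · have hxn : x ≠ node := fun he => by rw [he, hc] at hxold; cases hxold
        rw [hgetD', if_neg hxn, hw1, if_neg (hnotroot x hxold), hwordnew,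
          if_neg (ne_of_lt (h8 x hxold))]
        exact h5 x hxold
    · -- (6)
      intro x tok' hx hf hwt'
      rcases (hcont' x).mp hx with hxe | hxold
      · rw [hxe] at hf
        have htt : tok' = tok := by
          rcases hnode with hn | hn <;> rcases hf with hf | hf <;> rw [hn] at hf <;>
            exact String.toList_inj.mp (by injection hf with h1 h2; exact h2.symm)
        rw [htt] at hwt' ⊢
        rw [hxe, hrr, hw1, if_pos rfl, if_pos hwt']
      · rw [hw1, if_neg (hnotroot x hxold)]
        exact h6 x tok' hxold hf hwt'
    · -- (7)
      intro c x
      rw [PySem.Dict.getD_insert]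
      by_cases hcn : c = nxt
      · subst hcn
        rw [if_pos rfl]
        simp only [List.mem_singleton]
        constructor
        · intro he
          rw [he]
          exact ⟨(hcont' node).mpr (Or.inl rfl), by rw [hgetD', if_pos rfl]⟩
        · rintro ⟨hx, hg⟩
          rcases (hcont' x).mp hx with hxe | hxold
          · exact hxe
          · rw [hgetD', if_neg (fun he : x = node => by rw [he, hc] at hxold; cases hxold)] at hg
            exact absurd hg (ne_of_lt (h8 x hxold))
      · rw [if_neg hcn]
        rw [h7 c x]
        constructor
        · rintro ⟨hx, hg⟩
          refine ⟨(hcont' x).mpr (Or.inr hx), ?_⟩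
          rw [hgetD', if_neg (fun he : x = node => by rw [he, hc] at hx; cases hx)]
          exact hg
        · rintro ⟨hx, hg⟩
          rcases (hcont' x).mp hx with hxe | hxold
          · rw [hxe, hgetD', if_pos rfl] at hg
            exact absurd hg.symm hcn
          · rw [hgetD', if_neg (fun he : x = node => by rw [he, hc] at hxold; cases hxold)] at hg
            exact ⟨hxold, hg⟩
    · -- (8)
      intro x hx
      rcases (hcont' x).mp hx with hxe | hxold
      · rw [hxe, hgetD', if_pos rfl]; omega
      · rw [hgetD', if_neg (fun he : x = node => by rw [he, hc] at hxold; cases hxold)]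
        have := h8 x hxold; omega
    · -- (9)
      intro c hcge
      rw [hwordnew, if_neg (by omega : c ≠ nxt)]
      exact h9 c (by omega)
    · exact (hcont' node).mpr (Or.inl rfl)
    · intro x hx; exact (hcont' x).mpr (Or.inr hx)

lemma pvStep_rel {r : pvRD} {w : pvWD} {comp : pvCD} {members : pvMD} {word : pvID} {nxt : Int}
    (hinv : pvInv r w comp members word nxt) (p : String × String) :
    (pvStepA (some (r, w)) p = none ∧ pvStepB (some (comp, members, word, nxt)) p = none) ∨
    (∃ r' w' comp' members' word' nxt',
      pvStepA (some (r, w)) p = some (r', w') ∧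
      pvStepB (some (comp, members, word, nxt)) p = some (comp', members', word', nxt') ∧
      pvInv r' w' comp' members' word' nxt' ∧
      comp'.contains ('A' :: p.1.toList) = true ∧
      (∀ x, comp.contains x = true → comp'.contains x = true)) := by
  obtain ⟨hinv1, hcA1, hmono1, hn1⟩ := pvAdd_inv hinv p.1 ('A' :: p.1.toList) (Or.inl rfl)
  obtain ⟨hinv2, hcB2, hmono2, hn2⟩ := pvAdd_inv hinv1 p.2 ('B' :: p.2.toList) (Or.inr rfl)
  have hcA2 := hmono2 _ hcA1
  -- names for the phase-1 state
  set nA : pvK := 'A' :: p.1.toList with hnA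
  set nB : pvK := 'B' :: p.2.toList with hnB
  set w2 : pvWD := (if pvWordTest p.2 then
      (if pvWordTest p.1 then w.insert nA p.1 else w).insert nB p.2
      else (if pvWordTest p.1 then w.insert nA p.1 else w)) with hw2
  set st2 := pvAddNode (pvAddNode (comp, members, word, nxt) nA p.1) nB p.2 with hst2
  set c2 := st2.1 with hc2
  set m2 := st2.2.1 with hm2
  set wo2 := st2.2.2.1 with hwo2
  set n2 := st2.2.2.2 with hn2'
  obtain ⟨g1, g2, g3, g4, g5, g6, g7, g8, g9⟩ := hinv2
  have hstepA : pvStepA (some (r, w)) p =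
      (if (pvUnion r w2 nA nB).2.2 then some ((pvUnion r w2 nA nB).1, (pvUnion r w2 nA nB).2.1) else none) := by
    rfl
  have hstepB : pvStepB (some (comp, members, word, nxt)) p =
      (if c2.getD nA 0 = c2.getD nB 0 then some (c2, m2, wo2, n2)
       else
        match (match wo2.get? (c2.getD nB 0) with
              | none => some wo2
              | some wb => match wo2.get? (c2.getD nA 0) with
                | none => some (wo2.insert (c2.getD nA 0) wb)
                | some wa => if wa = wb then some wo2 else none : Option pvID) with
        | none => none
        | some word' => some ((m2.getD (c2.getD nB 0) []).foldl (fun c n => c.insert n (c2.getD nA 0)) c2,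
            (m2.insert (c2.getD nA 0) (m2.getD (c2.getD nA 0) [] ++ m2.getD (c2.getD nB 0) [])).erase (c2.getD nB 0),
            word', n2)) := rfl
  by_cases hcc : c2.getD nA 0 = c2.getD nB 0
  · -- same component: A only path-compresses, B does nothing
    have hre : pvRoot r nA = pvRoot r nB := (g4 nA nB hcA2 hcB2).mpr hcc
    obtain ⟨hwu, hoku, hpres⟩ := pvUnion_eq_spec (w := w2) g1 hre
    right
    refine ⟨(pvUnion r w2 nA nB).1, w2, c2, m2, wo2, n2, ?_, ?_, ?_, hcA2, ?_⟩
    · rw [hstepA, hoku]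
      simp [hwu]
    · rw [hstepB, if_pos hcc]
    · exact pvInv_pres ⟨g1, g2, g3, g4, g5, g6, g7, g8, g9⟩ hpres
    · intro x hx
      exact hmono2 _ (hmono1 _ hx)
  · -- distinct components: A links the roots, B merges by relabelling
    have hrne : pvRoot r nA ≠ pvRoot r nB := fun he => hcc ((g4 nA nB hcA2 hcB2).mp he)
    obtain ⟨hgood3, hroots3, hkeys3, hok, hwspec⟩ := pvUnion_ne_spec (w := w2) g1 hrne
    have ha0 : w2.get? (pvRoot r nA) = wo2.get? (c2.getD nA 0) := g5 nA hcA2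
    have hb0 : w2.get? (pvRoot r nB) = wo2.get? (c2.getD nB 0) := g5 nB hcB2
    set sa := pvRoot r nA with hsa
    set sb := pvRoot r nB with hsb
    set ca := c2.getD nA 0 with hca
    set cb := c2.getD nB 0 with hcb
    set ru := (pvUnion r w2 nA nB).1 with hru
    set compM := (m2.getD cb []).foldl (fun c n => c.insert n ca) c2 with hcompM
    set memM := (m2.insert ca (m2.getD ca [] ++ m2.getD cb [])).erase cb with hmemM0
    have hcsa : c2.contains sa = true := g3 nA hcA2
    have hcsb : c2.contains sb = true := g3 nB hcB2
    have hcaltn : ca < n2 := g8 nA hcA2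
    have hcontM : ∀ x, compM.contains x = c2.contains x := by
      intro x
      rw [hcompM, pvRelabel_contains]
      cases hx : c2.contains x with
      | true => simp
      | false =>
        have : x ∉ m2.getD cb [] := fun hm => by
          have := ((g7 cb x).mp hm).1
          rw [hx] at this; cases this
        simp [this]
    have hgdM : ∀ x, c2.contains x = true →
        compM.getD x 0 = if c2.getD x 0 = cb then ca else c2.getD x 0 := by
      intro x hx
      rw [hcompM, pvRelabel_getD]
      by_cases hm : x ∈ m2.getD cb []
      · rw [if_pos hm, if_pos ((g7 cb x).mp hm).2]
      · rw [if_neg hm, if_neg (fun he => hm ((g7 cb x).mpr ⟨hx, he⟩))]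
    have hmemM : ∀ c, memM.getD c [] =
        if c = cb then [] else if c = ca then m2.getD ca [] ++ m2.getD cb [] else m2.getD c [] := by
      intro c
      rw [hmemM0, pvGetD_erase, PySem.Dict.getD_insert]
    have hRu : ∀ x, pvRoot ru x = if pvRoot r x = sb then sa else pvRoot r x := hroots3
    have hrwx : ∀ x, c2.contains x = true → (pvRoot r x = sa ↔ c2.getD x 0 = ca) :=
      fun x hx => g4 x nA hx hcA2
    have hrwxb : ∀ x, c2.contains x = true → (pvRoot r x = sb ↔ c2.getD x 0 = cb) :=
      fun x hx => g4 x nB hx hcB2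
    have hMerged : ∀ (w' : pvWD) (word' : pvID),
        ((wo2.get? cb = none ∧ w' = w2 ∧ word' = wo2) ∨
         (∃ v, wo2.get? cb = some v ∧ wo2.get? ca = some v ∧ w' = w2 ∧ word' = wo2) ∨
         (∃ wb, wo2.get? cb = some wb ∧ wo2.get? ca = none ∧
            w' = w2.insert sa wb ∧ word' = wo2.insert ca wb)) →
        pvInv ru w' compM memM word' n2 := by
      intro w' word' H
      have Ka : w'.get? sa = word'.get? ca := by
        rcases H with ⟨_, hw', hwd'⟩ | ⟨v, _, _, hw', hwd'⟩ | ⟨wb, _, _, hw', hwd'⟩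
        · rw [hw', hwd']; exact ha0
        · rw [hw', hwd']; exact ha0
        · rw [hw', hwd', PySem.Dict.get?_insert_self, PySem.Dict.get?_insert_self]
      have Kc : ∀ x, c2.contains x = true → pvRoot r x ≠ sb →
          w'.get? (pvRoot r x) = word'.get? (c2.getD x 0) := by
        intro x hx hb
        by_cases hA : pvRoot r x = sa
        · rw [hA, (hrwx x hx).mp hA]; exact Ka
        · have hc : c2.getD x 0 ≠ ca := fun he => hA ((hrwx x hx).mpr he)
          rcases H with ⟨_, hw', hwd'⟩ | ⟨v, _, _, hw', hwd'⟩ | ⟨wb, _, _, hw', hwd'⟩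
          · rw [hw', hwd']; exact g5 x hx
          · rw [hw', hwd']; exact g5 x hx
          · rw [hw', hwd', PySem.Dict.get?_insert_of_ne _ _ hA, PySem.Dict.get?_insert_of_ne _ _ hc]
            exact g5 x hx
      have Kd : ∀ x, c2.contains x = true → ∀ tok : String,
          w2.get? (pvRoot r x) = some tok → w'.get? (pvRoot ru x) = some tok := by
        intro x hx tok hold
        rw [hRu x]
        by_cases hb : pvRoot r x = sb
        · rw [if_pos hb]
          rw [hb] at hold
          have hwb2 : wo2.get? cb = some tok := by rw [← hb0]; exact hold
          rcases H with ⟨hn, _, _⟩ | ⟨v, hv1, hv2, hw', hwd'⟩ | ⟨wb, hb1, _, hw', hwd'⟩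
          · rw [hn] at hwb2; cases hwb2
          · have hv : v = tok := by rw [hv1] at hwb2; exact (Option.some_injective _ hwb2)
            rw [hw', ha0, hv2, hv]
          · have hwb' : wb = tok := by rw [hb1] at hwb2; exact (Option.some_injective _ hwb2)
            rw [hw', PySem.Dict.get?_insert_self, hwb']
        · rw [if_neg hb]
          rcases H with ⟨_, hw', _⟩ | ⟨v, _, _, hw', _⟩ | ⟨wb, _, ha2', hw', _⟩
          · rw [hw']; exact hold
          · rw [hw']; exact hold
          · by_cases hA : pvRoot r x = sa
            · exfalso
              rw [hA] at hold
              rw [ha0, ha2'] at hold; cases hold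
            · rw [hw', PySem.Dict.get?_insert_of_ne _ _ hA]; exact hold
      have Ke : ∀ x, c2.contains x = false → w'.get? x = none := by
        intro x hx
        have hxa : x ≠ sa := fun he => by rw [he, hcsa] at hx; cases hx
        rcases H with ⟨_, hw', _⟩ | ⟨v, _, _, hw', _⟩ | ⟨wb, _, _, hw', _⟩
        · rw [hw']; exact (g2 x hx).2
        · rw [hw']; exact (g2 x hx).2
        · rw [hw', PySem.Dict.get?_insert_of_ne _ _ hxa]; exact (g2 x hx).2
      have Kf : ∀ c, n2 ≤ c → word'.get? c = none := by
        intro c hc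
        have hcca : c ≠ ca := by omega
        rcases H with ⟨_, _, hwd'⟩ | ⟨v, _, _, _, hwd'⟩ | ⟨wb, _, _, _, hwd'⟩
        · rw [hwd']; exact g9 c hc
        · rw [hwd']; exact g9 c hc
        · rw [hwd', PySem.Dict.get?_insert_of_ne _ _ hcca]; exact g9 c hc
      refine ⟨hgood3, ?_, ?_, ?_, ?_, ?_, ?_, ?_, Kf⟩
      · -- (2)
        intro x hx
        rw [hcontM] at hx
        constructor
        · rw [PySem.Dict.get?_eq_none_iff_not_mem_keys, hkeys3]
          rintro (hmem | hxe)
          · have hno := (g2 x hx).1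
            rw [PySem.Dict.get?_eq_none_iff_not_mem_keys] at hno
            exact hno hmem
          · rw [hxe, hcsb] at hx; cases hx
        · exact Ke x hx
      · -- (3)
        intro x hx
        rw [hcontM] at hx ⊢
        rw [hRu x]
        by_cases hb : pvRoot r x = sb
        · rw [if_pos hb]; exact hcsa
        · rw [if_neg hb]; exact g3 x hx
      · -- (4)
        intro x y hx hy
        rw [hcontM] at hx hy
        rw [hRu x, hRu y, hgdM x hx, hgdM y hy]
        by_cases hbx : pvRoot r x = sb <;> by_cases hby : pvRoot r y = sb
        · rw [if_pos hbx, if_pos hby, if_pos ((hrwxb x hx).mp hbx), if_pos ((hrwxb y hy).mp hby)]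
          simp
        · rw [if_pos hbx, if_neg hby, if_pos ((hrwxb x hx).mp hbx),
            if_neg (fun he => hby ((hrwxb y hy).mpr he))]
          constructor
          · intro he; exact ((hrwx y hy).mp he.symm).symm
          · intro he; exact ((hrwx y hy).mpr he.symm).symm
        · rw [if_neg hbx, if_pos hby, if_neg (fun he => hbx ((hrwxb x hx).mpr he)),
            if_pos ((hrwxb y hy).mp hby)]
          constructor
          · intro he; exact (hrwx x hx).mp he
          · intro he; exact (hrwx x hx).mpr he
        · rw [if_neg hbx, if_neg hby, if_neg (fun he => hbx ((hrwxb x hx).mpr he)),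
            if_neg (fun he => hby ((hrwxb y hy).mpr he))]
          exact g4 x y hx hy
      · -- (5)
        intro x hx
        rw [hcontM] at hx
        rw [hRu x, hgdM x hx]
        by_cases hb : pvRoot r x = sb
        · rw [if_pos hb, if_pos ((hrwxb x hx).mp hb)]; exact Ka
        · rw [if_neg hb, if_neg (fun he => hb ((hrwxb x hx).mpr he))]; exact Kc x hx hb
      · -- (6)
        intro x tok hx hf hwt
        rw [hcontM] at hx
        exact Kd x hx tok (g6 x tok hx hf hwt)
      · -- (7)
        intro c x
        rw [hmemM c, hcontM]
        by_cases hccb : c = cb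
        · rw [if_pos hccb]
          simp only [List.not_mem_nil, false_iff]
          rintro ⟨hx, hg⟩
          rw [hgdM x hx, hccb] at hg
          by_cases hgb : c2.getD x 0 = cb
          · rw [if_pos hgb] at hg; exact hcc hg
          · rw [if_neg hgb] at hg; exact hgb hg
        · rw [if_neg hccb]
          by_cases hcca : c = ca
          · rw [if_pos hcca, List.mem_append, g7, g7]
            constructor
            · rintro (⟨hx, hg⟩ | ⟨hx, hg⟩)
              · exact ⟨hx, by rw [hgdM x hx, hg, ← hcca]; rw [if_neg (hcca ▸ hcc)]⟩
              · exact ⟨hx, by rw [hgdM x hx, hg, if_pos rfl, hcca]⟩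
            · rintro ⟨hx, hg⟩
              rw [hgdM x hx] at hg
              by_cases hgb : c2.getD x 0 = cb
              · exact Or.inr ⟨hx, hgb⟩
              · rw [if_neg hgb] at hg; exact Or.inl ⟨hx, by rw [hg, hcca]⟩
          · rw [if_neg hcca, g7]
            constructor
            · rintro ⟨hx, hg⟩
              refine ⟨hx, ?_⟩
              rw [hgdM x hx, if_neg (fun he : c2.getD x 0 = cb => hccb (by rw [← hg, he]))]
              exact hg
            · rintro ⟨hx, hg⟩
              rw [hgdM x hx] at hg
              refine ⟨hx, ?_⟩
              by_cases hgb : c2.getD x 0 = cb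
              · rw [if_pos hgb] at hg; exact absurd hg.symm hcca
              · rw [if_neg hgb] at hg; exact hg
      · -- (8)
        intro x hx
        rw [hcontM] at hx
        rw [hgdM x hx]
        by_cases hgb : c2.getD x 0 = cb
        · rw [if_pos hgb]; exact hcaltn
        · rw [if_neg hgb]; exact g8 x hx
    cases hwb : wo2.get? cb with
    | none =>
      have hw2sb : w2.get? sb = none := by rw [hb0, hwb]
      have htrue : (pvUnion r w2 nA nB).2.2 = true := by
        cases hu : (pvUnion r w2 nA nB).2.2
        · exfalso
          obtain ⟨wb', wa', hb', ha', hne'⟩ := hok.mp hu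
          rw [hw2sb] at hb'; cases hb'
        · rfl
      have hwu : (pvUnion r w2 nA nB).2.1 = w2 := by
        rw [hwspec, hw2sb]
      right
      refine ⟨ru, w2, compM, memM, wo2, n2, ?_, ?_, hMerged w2 wo2 (Or.inl ⟨hwb, rfl, rfl⟩), ?_, ?_⟩
      · rw [hstepA, htrue, hwu]
        rfl
      · rw [hstepB, if_neg hcc, hwb]
      · rw [hcontM]; exact hcA2
      · intro x hx; rw [hcontM]; exact hmono2 _ (hmono1 _ hx)
    | some wb =>
      have hw2sb : w2.get? sb = some wb := by rw [hb0, hwb]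
      cases hwa : wo2.get? ca with
      | none =>
        have hw2sa : w2.get? sa = none := by rw [ha0, hwa]
        have htrue : (pvUnion r w2 nA nB).2.2 = true := by
          cases hu : (pvUnion r w2 nA nB).2.2
          · exfalso
            obtain ⟨wb', wa', hb', ha', hne'⟩ := hok.mp hu
            rw [hw2sa] at ha'; cases ha'
          · rfl
        have hwu : (pvUnion r w2 nA nB).2.1 = w2.insert sa wb := by
          rw [hwspec, hw2sb, hw2sa]
        right
        refine ⟨ru, w2.insert sa wb, compM, memM, wo2.insert ca wb, n2, ?_, ?_,
          hMerged _ _ (Or.inr (Or.inr ⟨wb, hwb, hwa, rfl, rfl⟩)), ?_, ?_⟩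
        · rw [hstepA, htrue, hwu]
          rfl
        · rw [hstepB, if_neg hcc, hwb, hwa]
        · rw [hcontM]; exact hcA2
        · intro x hx; rw [hcontM]; exact hmono2 _ (hmono1 _ hx)
      | some wa =>
        have hw2sa : w2.get? sa = some wa := by rw [ha0, hwa]
        by_cases hww : wa = wb
        · have htrue : (pvUnion r w2 nA nB).2.2 = true := by
            cases hu : (pvUnion r w2 nA nB).2.2
            · exfalso
              obtain ⟨wb', wa', hb', ha', hne'⟩ := hok.mp hu
              rw [hw2sb] at hb'
              rw [hw2sa] at ha'
              exact hne' ((Option.some_injective _ ha').symm.trans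
                (hww.trans (Option.some_injective _ hb')))
            · rfl
          have hwu : (pvUnion r w2 nA nB).2.1 = w2 := by
            rw [hwspec, hw2sb, hw2sa]
          right
          refine ⟨ru, w2, compM, memM, wo2, n2, ?_, ?_,
            hMerged w2 wo2 (Or.inr (Or.inl ⟨wb, hwb, hww ▸ hwa, rfl, rfl⟩)), ?_, ?_⟩
          · rw [hstepA, htrue, hwu]
            rfl
          · rw [hstepB, if_neg hcc, hwb, hwa]
            simp [hww]
          · rw [hcontM]; exact hcA2
          · intro x hx; rw [hcontM]; exact hmono2 _ (hmono1 _ hx)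
        · have hfalse : (pvUnion r w2 nA nB).2.2 = false :=
            hok.mpr ⟨wb, wa, hw2sb, hw2sa, hww⟩
          left
          constructor
          · rw [hstepA, hfalse]
            rfl
          · rw [hstepB, if_neg hcc, hwb, hwa]
            simp [hww]

lemma pvFoldA_none : ∀ L : List (String × String), L.foldl pvStepA none = none := by
  intro L; induction L with
  | nil => rfl
  | cons p L ih => simpa [pvStepA] using ih

lemma pvFoldB_none : ∀ L : List (String × String), L.foldl pvStepB none = none := by
  intro L; induction L with
  | nil => rfl
  | cons p L ih => simpa [pvStepB] using ih

lemma pvLoop_rel : ∀ (L : List (String × String)) {r : pvRD} {w : pvWD} {comp : pvCD}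
    {members : pvMD} {word : pvID} {nxt : Int},
    pvInv r w comp members word nxt →
    (L.foldl pvStepA (some (r, w)) = none ∧
     L.foldl pvStepB (some (comp, members, word, nxt)) = none) ∨
    (∃ r' w' comp' members' word' nxt',
      L.foldl pvStepA (some (r, w)) = some (r', w') ∧
      L.foldl pvStepB (some (comp, members, word, nxt)) = some (comp', members', word', nxt') ∧
      pvInv r' w' comp' members' word' nxt' ∧
      (∀ p ∈ L, comp'.contains ('A' :: p.1.toList) = true) ∧
      (∀ x, comp.contains x = true → comp'.contains x = true)) := by
  intro L
  induction L with
  | nil =>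
    intro r w comp members word nxt hinv
    right
    exact ⟨r, w, comp, members, word, nxt, rfl, rfl, hinv, by simp, fun x hx => hx⟩
  | cons p L ih =>
    intro r w comp members word nxt hinv
    rcases pvStep_rel hinv p with ⟨hA, hB⟩ | ⟨r1, w1, c1, m1, wo1, n1, hA, hB, hinv1, hcA, hmono⟩
    · left
      simp only [List.foldl_cons, hA, hB]
      exact ⟨pvFoldA_none L, pvFoldB_none L⟩
    · simp only [List.foldl_cons, hA, hB]
      rcases ih hinv1 with ⟨hA', hB'⟩ | ⟨r', w', c', m', wo', n', hA', hB', hinv', hall, hmono'⟩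
      · left; exact ⟨hA', hB'⟩
      · right
        refine ⟨r', w', c', m', wo', n', hA', hB', hinv', ?_, fun x hx => hmono' x (hmono x hx)⟩
        intro q hq
        rcases List.mem_cons.mp hq with hq | hq
        · rw [hq]; exact hmono' _ hcA
        · exact hall q hq

lemma pvInv_init : pvInv PySem.Dict.empty PySem.Dict.empty PySem.Dict.empty PySem.Dict.empty
    PySem.Dict.empty 0 := by
  refine ⟨?_, ?_, ?_, ?_, ?_, ?_, ?_, ?_, ?_⟩
  · intro x
    rw [pvRootN_none (PySem.Dict.get?_empty x)]
    rfl
  · intro x _; exact ⟨PySem.Dict.get?_empty x, PySem.Dict.get?_empty x⟩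
  · intro x hx; rw [PySem.Dict.contains_empty] at hx; cases hx
  · intro x y hx; rw [PySem.Dict.contains_empty] at hx; cases hx
  · intro x hx; rw [PySem.Dict.contains_empty] at hx; cases hx
  · intro x tok hx; rw [PySem.Dict.contains_empty] at hx; cases hx
  · intro c x
    rw [PySem.Dict.getD_empty]
    simp only [List.not_mem_nil, false_iff]
    rintro ⟨hx, _⟩
    rw [PySem.Dict.contains_empty] at hx; cases hx
  · intro x hx; rw [PySem.Dict.contains_empty] at hx; cases hx
  · intro c _; exact PySem.Dict.get?_empty c

lemma pvOut_fold (w : pvWD) : ∀ (L : List String) (r : pvRD) (acc : List String), pvGood r →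
    (L.foldl (fun (st : pvRD × List String) a =>
        let f := pvFind (st.1.size + 1) st.1 ('A' :: a.toList)
        (f.1, st.2 ++ [w.getD f.2 "x"])) (r, acc)).2
    = acc ++ L.map (fun a => w.getD (pvRoot r ('A' :: a.toList)) "x") := by
  intro L
  induction L with
  | nil => intro r acc _; simp
  | cons a L ih =>
    intro r acc hg
    obtain ⟨hf2, hpres⟩ := pvFind_spec (pvGood_rootN hg ('A' :: a.toList))
    simp only [List.foldl_cons]
    rw [ih _ _ (pvGood_pres hg hpres)]
    have hroots : ∀ y, pvRoot (pvFind (r.size + 1) r ('A' :: a.toList)).1 y = pvRoot r y :=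
      pvRoot_pres hg hpres
    simp [hf2, hroots]

lemma pvGet?_bridge {w' : pvWD} {wo' : pvID} {c' : pvCD} {r' : pvRD}
    (h : w'.get? (pvRoot r' ('A' :: (a : String).toList)) = wo'.get? (c'.getD ('A' :: a.toList) 0)) :
    w'.getD (pvRoot r' ('A' :: a.toList)) "x" = wo'.getD (c'.getD ('A' :: a.toList) 0) "x" := by
  rw [PySem.Dict.getD_eq_get?_getD, PySem.Dict.getD_eq_get?_getD, h]

theorem pv_main (A B : List String) : match_both A B = match_both_alt A B := by
  unfold match_both match_both_alt
  by_cases hlen : A.length ≠ B.length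
  · rw [if_pos hlen, if_pos hlen]
  · rw [if_neg hlen, if_neg hlen]
    have hlen' : A.length = B.length := not_not.mp hlen
    rcases pvLoop_rel (A.zip B) pvInv_init with ⟨hA, hB⟩ |
      ⟨r', w', c', m', wo', n', hA, hB, hinv', hall, _⟩
    · rw [hA, hB]
    · rw [hA, hB]
      obtain ⟨hg', h2', h3', h4', h5', h6', h7', h8', h9'⟩ := hinv'
      dsimp only
      rw [pvOut_fold w' A r' [] hg', List.nil_append]
      congr 1
      apply List.map_congr_left
      intro a ha
      obtain ⟨b, hab⟩ := pvMem_zip_left hlen' a ha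
      exact pvGet?_bridge (h5' _ (hall _ hab))

-- ===== VERDICT (by name: the statement is the Claim_ definition above) =====
theorem match_both_spec : Claim_equal_match_both := by
  intro A B _ _
  show match_both A B = match_both_alt A B
  exact pv_main A B
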